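-- pv_equiv track=rewrite | github.com/MrBrantCode/unitest_baseline | mut_generate/mist_train_cf/cf_52527/solution.py | third_smallest_distinct_even
-- ===== SOURCE A (Python) =====
-- def third_smallest_distinct_even(l: list):
--     even_list = []
--     product = 1
--     for x in sorted(set(l)):
--         if x % 2 == 0:
--             even_list.append(x)
--             product *= x
--     if len(even_list) >= 3:
--         return even_list[2], product
--     else:
--         return None, None
-- ===== SOURCE B (Python) =====
-- import heapq
-- import math
--
--
-- def third_smallest_distinct_even(l: list):
--     evens = {x for x in l if x % 2 == 0}
--     if len(evens) < 3:
--         return None, None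
--     return heapq.nsmallest(3, evens)[2], math.prod(evens)
-- ===== Notes on version B (the rewrite author's own statement) =====
-- stated objective: idiomatic
-- what changed: Replaces A's sort-then-scan accumulator loop over sorted(set(l)) by building the distinct-even set directly with a comprehension, taking the third smallest via heap-based partial selection (heapq.nsmallest(3, ...)) and computing the product in an independent math.prod reduction.
import Mathlib
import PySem

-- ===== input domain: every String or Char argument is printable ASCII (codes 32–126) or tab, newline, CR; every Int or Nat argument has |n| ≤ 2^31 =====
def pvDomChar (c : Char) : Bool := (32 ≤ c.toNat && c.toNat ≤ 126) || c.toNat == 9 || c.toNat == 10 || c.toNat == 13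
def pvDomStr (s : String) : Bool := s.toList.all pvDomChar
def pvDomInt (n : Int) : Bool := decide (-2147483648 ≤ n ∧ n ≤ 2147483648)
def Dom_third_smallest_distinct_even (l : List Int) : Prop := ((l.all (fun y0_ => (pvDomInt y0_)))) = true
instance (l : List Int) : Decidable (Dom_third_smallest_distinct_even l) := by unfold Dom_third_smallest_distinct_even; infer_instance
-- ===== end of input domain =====

-- B builds the distinct-even set directly, selects the third smallest with heap-based
-- partial selection and computes the product in a separate reduction (objective: idiomatic).

-- ===== PORT A =====
def third_smallest_distinct_even (l : List Int) : List (Option Int) :=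
  -- for x in sorted(set(l)): if x % 2 == 0: even_list.append(x); product *= x
  let st := (PySem.List.sorted (PySem.Set.ofList l) (fun x => x) false).foldl
    (fun (s : List Int × Int) x =>
      if PySem.Int.mod x 2 == 0 then (s.1 ++ [x], s.2 * x) else s)
    ([], 1)
  if st.1.length ≥ 3 then [PySem.List.pyGet? st.1 2, some st.2] else [none, none]

-- ===== PORT B =====
def third_smallest_distinct_even_alt (l : List Int) : List (Option Int) :=
  -- evens = {x for x in l if x % 2 == 0}
  let evens : PySem.Set Int := PySem.Set.ofList (l.filter (fun x => PySem.Int.mod x 2 == 0))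
  if PySem.Set.len evens < 3 then [none, none]
  else
    -- heapq.nsmallest(3, evens)[2], math.prod(evens)
    [PySem.List.pyGet? ((PySem.List.sorted evens (fun x => x) false).take 3) 2,
     some (evens.foldl (· * ·) 1)]

-- ===== PRECONDITION & SPEC =====
def Spec_third_smallest_distinct_even (l : List Int) (out : List (Option Int)) : Prop := out = third_smallest_distinct_even_alt l
instance (l : List Int) (out : List (Option Int)) : Decidable (Spec_third_smallest_distinct_even l out) := by unfold Spec_third_smallest_distinct_even; infer_instance

-- ===== CLAIM (what is proved, stated in full; the proofs are below) =====
def Claim_equal_third_smallest_distinct_even : Prop := ∀ (l : List Int), Dom_third_smallest_distinct_even l → Spec_third_smallest_distinct_even l (third_smallest_distinct_even l)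

-- ===== LEMMAS AND PROOFS =====

-- A's accumulator loop computes the filtered list and its product.
theorem pvFoldlFilterProd (p : Int → Bool) (xs : List Int) (acc : List Int) (pr : Int) :
    xs.foldl (fun (s : List Int × Int) x => if p x then (s.1 ++ [x], s.2 * x) else s) (acc, pr)
      = (acc ++ xs.filter p, pr * (xs.filter p).prod) := by
  induction xs generalizing acc pr with
  | nil => simp
  | cons x xs ih =>
    by_cases h : p x
    · simp [h, ih, mul_assoc]
    · simp [h, ih]

-- B's evens set is a permutation of A's even_list (the even entries of sorted(set(l))).
theorem pvEvensPerm (p : Int → Bool) (l : List Int) :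
    (PySem.Set.ofList (l.filter p) : List Int).Perm
      ((PySem.List.sorted (PySem.Set.ofList l) (fun x => x) false).filter p) := by
  apply List.perm_of_nodup_nodup_toFinset_eq
  · exact PySem.Set.nodup_ofList _
  · exact List.Nodup.filter p
      ((PySem.List.sorted_perm (PySem.Set.ofList l) (fun x => x) false).nodup_iff.mpr
        (PySem.Set.nodup_ofList l))
  · apply Finset.ext
    intro a
    simp [PySem.Set.mem_ofList, PySem.List.mem_sorted]

-- sorted(evens) IS A's even_list: strictly increasing rearrangement.
theorem pvSortedEvens (p : Int → Bool) (l : List Int) :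
    PySem.List.sorted (PySem.Set.ofList (l.filter p)) (fun x => x) false
      = (PySem.List.sorted (PySem.Set.ofList l) (fun x => x) false).filter p := by
  apply PySem.List.sorted_eq_of_perm_of_pairwise_lt
  · exact (pvEvensPerm p l).symm
  · exact (PySem.List.sorted_ofList_pairwise_lt l).filter p

theorem third_smallest_distinct_even_eq (l : List Int) :
    third_smallest_distinct_even l = third_smallest_distinct_even_alt l := by
  have hfold := pvFoldlFilterProd (fun x => PySem.Int.mod x 2 == 0)
    (PySem.List.sorted (PySem.Set.ofList l) (fun x => x) false) [] 1
  have hperm := pvEvensPerm (fun x => PySem.Int.mod x 2 == 0) l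
  have hsorted := pvSortedEvens (fun x => PySem.Int.mod x 2 == 0) l
  unfold third_smallest_distinct_even third_smallest_distinct_even_alt
  rw [hfold]
  simp only [List.nil_append, one_mul]
  have hlenset : PySem.Set.len (PySem.Set.ofList
      (l.filter (fun x => PySem.Int.mod x 2 == 0)))
      = (((PySem.List.sorted (PySem.Set.ofList l) (fun x => x) false).filter
          (fun x => PySem.Int.mod x 2 == 0)).length : Int) := by
    simp only [PySem.Set.len, PySem.List.len_eq]
    exact_mod_cast hperm.length_eq
  by_cases h3 : ((PySem.List.sorted (PySem.Set.ofList l) (fun x => x) false).filter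
      (fun x => PySem.Int.mod x 2 == 0)).length ≥ 3
  · rw [if_pos h3, if_neg (by rw [hlenset]; exact_mod_cast by omega), hsorted]
    have htake : PySem.List.pyGet?
        (((PySem.List.sorted (PySem.Set.ofList l) (fun x => x) false).filter
          (fun x => PySem.Int.mod x 2 == 0)).take 3) 2
        = PySem.List.pyGet?
        ((PySem.List.sorted (PySem.Set.ofList l) (fun x => x) false).filter
          (fun x => PySem.Int.mod x 2 == 0)) 2 := by
      have h1 := PySem.List.pyGet?_natCast
        (((PySem.List.sorted (PySem.Set.ofList l) (fun x => x) false).filter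
          (fun x => PySem.Int.mod x 2 == 0)).take 3) 2
      have h2 := PySem.List.pyGet?_natCast
        ((PySem.List.sorted (PySem.Set.ofList l) (fun x => x) false).filter
          (fun x => PySem.Int.mod x 2 == 0)) 2
      push_cast at h1 h2
      rw [h1, h2, List.getElem?_take]
      simp
    have hprod : (PySem.Set.ofList (l.filter (fun x => PySem.Int.mod x 2 == 0))
          : List Int).foldl (· * ·) 1
        = ((PySem.List.sorted (PySem.Set.ofList l) (fun x => x) false).filter
          (fun x => PySem.Int.mod x 2 == 0)).prod := by
      rw [← List.prod_eq_foldl]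
      exact hperm.prod_eq
    rw [htake, hprod]
  · rw [if_neg h3, if_pos (by rw [hlenset]; exact_mod_cast by omega)]

-- ===== VERDICT (by name: the statement is the Claim_ definition above) =====
theorem third_smallest_distinct_even_spec : Claim_equal_third_smallest_distinct_even := by
  intro l _
  exact third_smallest_distinct_even_eq l
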